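-- pv_equiv track=rewrite | github.com/mayaracouti/SAW-PROJECT | Data-extract/src/service/etl_indicadores.py | _normalizar_cabecalho
-- ===== SOURCE A (Python) =====
-- def _normalizar_cabecalho(colunas):
--     cabecalho = []
--     contadores = {}
--
--     for coluna in colunas:
--         nome = str(coluna).strip()
--         if not nome:
--             cabecalho.append("")
--             continue
--
--         quantidade = contadores.get(nome, 0)
--         contadores[nome] = quantidade + 1
--         cabecalho.append(nome if quantidade == 0 else f"{nome}_{quantidade}")
--
--     return cabecalho
-- ===== SOURCE B (Python) =====
-- def _normalizar_cabecalho(colunas):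
--     nomes = [str(c).strip() for c in colunas]
--     grupos = {}
--     for i, nome in enumerate(nomes):
--         grupos.setdefault(nome, []).append(i)
--     saida = [""] * len(nomes)
--     for nome, indices in grupos.items():
--         if not nome:
--             continue
--         for k, i in enumerate(indices):
--             saida[i] = nome if k == 0 else f"{nome}_{k}"
--     return saida
-- ===== Notes on version B (the rewrite author's own statement) =====
-- stated objective: alternative
-- what changed: Replaces A's single left-to-right pass with a running counter dict by a group-by-name pass (dict of index lists) followed by a scatter phase that writes each group's ordinal-suffixed names into a preallocated output array by position.
import Mathlib
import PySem

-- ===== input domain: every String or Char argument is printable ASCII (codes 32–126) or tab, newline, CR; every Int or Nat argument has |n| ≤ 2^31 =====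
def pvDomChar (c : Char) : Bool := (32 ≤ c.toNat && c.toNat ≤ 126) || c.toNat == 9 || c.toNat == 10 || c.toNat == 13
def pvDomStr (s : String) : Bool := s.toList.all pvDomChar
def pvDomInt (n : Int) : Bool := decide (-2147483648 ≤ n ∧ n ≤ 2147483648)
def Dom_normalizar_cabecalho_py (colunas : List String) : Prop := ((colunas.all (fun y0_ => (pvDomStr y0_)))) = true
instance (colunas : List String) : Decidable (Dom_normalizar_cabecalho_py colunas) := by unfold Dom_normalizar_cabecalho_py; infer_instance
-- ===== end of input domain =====

-- B replaces A's single pass with a running counter dict by a group-by-name pass (dict of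
-- index lists) followed by a scatter phase writing ordinal-suffixed names into a
-- preallocated output by position (objective: alternative algorithm, not faster).

-- ===== PORT A =====
-- one loop iteration: state = (cabecalho, contadores)
def pvStepA (st : List String × PySem.Dict String Int) (coluna : String) :
    List String × PySem.Dict String Int :=
  let nome := PySem.Str.strip coluna          -- str(coluna).strip(); coluna is already a str
  if nome = "" then (st.1 ++ [""], st.2)
  else
    let quantidade := st.2.getD nome 0
    (st.1 ++ [if quantidade = 0 then nome else nome ++ "_" ++ PySem.Int.toStr quantidade],
     st.2.insert nome (quantidade + 1))

def normalizar_cabecalho_py (colunas : List String) : List String :=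
  (colunas.foldl pvStepA ([], PySem.Dict.empty)).1

-- ===== PORT B =====
-- inner scatter loop for one group: 'for k, i in enumerate(indices): saida[i] = …'
-- (saida[i] = v is List.set: exact, since every stored index i satisfies 0 ≤ i < len(saida))
def pvScatterGroup (saida : List String) (nome : String) (indices : List Int) : List String :=
  if nome = "" then saida
  else (PySem.List.enumerate indices).foldl
    (fun o p => o.set p.2.toNat (if p.1 = 0 then nome else nome ++ "_" ++ PySem.Int.toStr p.1))
    saida

def normalizar_cabecalho_py_alt (colunas : List String) : List String :=
  let nomes := colunas.map PySem.Str.strip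
  -- grupos.setdefault(nome, []).append(i)  =  grupos[nome] = grupos.get(nome, []) + [i]
  let grupos := (PySem.List.enumerate nomes).foldl
    (fun d p => d.modify p.2 [] (fun l => l ++ [p.1])) (PySem.Dict.empty)
  let saida := List.replicate nomes.length ""
  grupos.items.foldl (fun o p => pvScatterGroup o p.1 p.2) saida

-- ===== PRECONDITION & SPEC =====
def Spec_normalizar_cabecalho_py (colunas : List String) (out : List String) : Prop := out = normalizar_cabecalho_py_alt colunas
instance (colunas : List String) (out : List String) : Decidable (Spec_normalizar_cabecalho_py colunas out) := by unfold Spec_normalizar_cabecalho_py; infer_instance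

-- ===== CLAIM (what is proved, stated in full; the proofs are below) =====
def Claim_equal_normalizar_cabecalho_py : Prop := ∀ (colunas : List String), Dom_normalizar_cabecalho_py colunas → Spec_normalizar_cabecalho_py colunas (normalizar_cabecalho_py colunas)

-- ===== LEMMAS AND PROOFS =====

-- the common pointwise characterization: entry i of the result, as a prefix count
def pvEntry (nomes : List String) (i : Nat) : String :=
  let nome := nomes.getD i ""
  if nome = "" then ""
  else
    let quantidade := (nomes.take i).count nome
    if quantidade = 0 then nome else nome ++ "_" ++ PySem.Int.toStr (quantidade : Int)

-- ===== A-side: A equals the pointwise characterization =====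

-- the counter dictionary A has built after processing stripped names `pre`
def pvDictOf (pre : List String) : PySem.Dict String Int :=
  pre.foldl (fun d x => if x = "" then d else d.insert x (d.getD x 0 + 1)) PySem.Dict.empty

lemma pvDictOf_append (pre : List String) (x : String) :
    pvDictOf (pre ++ [x]) =
      (if x = "" then pvDictOf pre else (pvDictOf pre).insert x ((pvDictOf pre).getD x 0 + 1)) := by
  simp [pvDictOf]

lemma pvGetD_dictOf (pre : List String) (n : String) (hn : n ≠ "") :
    (pvDictOf pre).getD n 0 = (pre.count n : Int) := by
  have h : pvDictOf pre =
      (pre.filter (fun x => decide (¬ x = ""))).foldl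
        (fun d x => d.insert x (d.getD x 0 + 1)) PySem.Dict.empty := by
    rw [List.foldl_filter]
    simp [pvDictOf]
  rw [h, PySem.Dict.getD_foldl_insert_add_one]
  simp [PySem.Dict.empty, PySem.Dict.getD, PySem.Dict.get?, List.count_filter, hn]

lemma pvGetD_at (pre : List String) (x : String) (rest : List String) :
    (pre ++ x :: rest).getD pre.length "" = x := by
  simp [List.getD]

lemma pvTailShift (rest pre : List String) (nome : String) (n : Nat) :
    List.map (fun i => pvEntry (pre ++ nome :: rest) (pre.length + 1 + i)) (List.range n)
      = List.map ((fun i => pvEntry (pre ++ nome :: rest) (pre.length + i)) ∘ (fun x => x + 1))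
          (List.range n) := by
  apply List.map_congr_left
  intro i _
  simp only [Function.comp]
  have h : pre.length + 1 + i = pre.length + (i + 1) := by omega
  rw [h]

lemma pvLoopA (cs : List String) : ∀ (acc pre : List String),
    (cs.foldl pvStepA (acc, pvDictOf pre)).1
      = acc ++ (List.range cs.length).map
          (fun i => pvEntry (pre ++ cs.map PySem.Str.strip) (pre.length + i)) := by
  induction cs with
  | nil => simp
  | cons c cs ih =>
    intro acc pre
    have hrange : List.range (cs.length + 1) = 0 :: (List.range cs.length).map (fun x => x + 1) := by
      simpa using List.range_succ_eq_map (n := cs.length)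
    by_cases h : PySem.Str.strip c = ""
    · have hstep : pvStepA (acc, pvDictOf pre) c = (acc ++ [""], pvDictOf pre) := by
        simp [pvStepA, h]
      have hd : pvDictOf pre = pvDictOf (pre ++ [PySem.Str.strip c]) := by
        rw [pvDictOf_append]; simp [h]
      have hhead : pvEntry (pre ++ PySem.Str.strip c :: cs.map PySem.Str.strip) pre.length
          = "" := by
        unfold pvEntry
        rw [pvGetD_at]
        simp [h]
      rw [List.foldl_cons, hstep, hd, ih (acc ++ [""]) (pre ++ [PySem.Str.strip c])]
      simp only [List.map_cons, List.length_cons, hrange, List.map_map, List.map_cons,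
        List.append_assoc, List.singleton_append, List.length_append, List.length_cons,
        List.length_nil, Nat.add_zero, Nat.zero_add]
      rw [hhead, pvTailShift]
    · set q : Int := (pvDictOf pre).getD (PySem.Str.strip c) 0 with hq
      have hqc : q = ((pre.count (PySem.Str.strip c)) : Int) := pvGetD_dictOf pre _ h
      have hstep : pvStepA (acc, pvDictOf pre) c =
          (acc ++ [if q = 0 then PySem.Str.strip c
                   else PySem.Str.strip c ++ "_" ++ PySem.Int.toStr q],
           pvDictOf (pre ++ [PySem.Str.strip c])) := by
        rw [pvDictOf_append]
        simp [pvStepA, h, hq]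
      have hhead : pvEntry (pre ++ PySem.Str.strip c :: cs.map PySem.Str.strip) pre.length
          = (if q = 0 then PySem.Str.strip c
             else PySem.Str.strip c ++ "_" ++ PySem.Int.toStr q) := by
        unfold pvEntry
        rw [pvGetD_at]
        have htake : (pre ++ PySem.Str.strip c :: cs.map PySem.Str.strip).take pre.length = pre :=
          List.take_left
        rw [htake]
        simp only [if_neg h, hqc]
        by_cases h0 : pre.count (PySem.Str.strip c) = 0 <;> simp [h0]
      rw [List.foldl_cons, hstep, ih _ (pre ++ [PySem.Str.strip c])]
      simp only [List.map_cons, List.length_cons, hrange, List.map_map, List.map_cons,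
        List.append_assoc, List.singleton_append, List.length_append, List.length_cons,
        List.length_nil, Nat.add_zero, Nat.zero_add]
      rw [hhead, pvTailShift]

lemma pvAeq (colunas : List String) :
    normalizar_cabecalho_py colunas
      = (List.range (colunas.map PySem.Str.strip).length).map
          (pvEntry (colunas.map PySem.Str.strip)) := by
  unfold normalizar_cabecalho_py
  have h := pvLoopA colunas [] []
  simp only [pvDictOf, List.foldl_nil] at h
  rw [h]
  simp

-- ===== B-side: the group-and-scatter fold equals the same characterization =====

-- the list of indices at which name n occurs in nomes (what B's grouping dict stores at n)
def pvIdx (nomes : List String) (n : String) : List Int :=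
  ((PySem.List.enumerate nomes).filter (fun p => p.2 == n)).map (fun p => p.1)

-- the value B writes for occurrence ordinal q
def pvVal (nome : String) (q : Int) : String :=
  if q = 0 then nome else nome ++ "_" ++ PySem.Int.toStr q

lemma pvIdx_mem (nomes : List String) (n : String) (x : Int) (h : x ∈ pvIdx nomes n) :
    ∃ k : Nat, x = (k : Int) ∧ nomes[k]? = some n := by
  unfold pvIdx at h
  simp only [List.mem_map, List.mem_filter, PySem.List.mem_enumerate_iff] at h
  obtain ⟨p, ⟨⟨k, hk, hp⟩, hn⟩, hx⟩ := h
  subst hp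
  refine ⟨k, by simpa using hx.symm, ?_⟩
  simp only [beq_iff_eq] at hn
  simp [List.getElem?_eq_getElem hk, hn]

lemma pvIdx_nonneg (nomes : List String) (n : String) : ∀ x ∈ pvIdx nomes n, 0 ≤ x := by
  intro x hx
  obtain ⟨k, hk, -⟩ := pvIdx_mem nomes n x hx
  omega

lemma pvIdx_nodup (nomes : List String) (n : String) : (pvIdx nomes n).Nodup := by
  unfold pvIdx
  have h1 : ((PySem.List.enumerate nomes).filter (fun p => p.2 == n)).Pairwise
      (fun p q => p.1 < q.1) := (PySem.List.pairwise_lt_enumerate nomes 0).filter _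
  have h2 : (pvIdx nomes n).Pairwise (fun a b => a < b) := by
    unfold pvIdx
    exact List.pairwise_map.mpr h1
  exact List.Pairwise.imp (fun h => ne_of_lt h) h2

lemma pvIdx_append (nomes : List String) (x : String) (n : String) :
    pvIdx (nomes ++ [x]) n
      = pvIdx nomes n ++ (if x = n then [(nomes.length : Int)] else []) := by
  unfold pvIdx
  rw [PySem.List.enumerate_append, List.filter_append, List.map_append]
  congr 1
  have h : PySem.List.enumerate [x] (0 + (nomes.length : Int))
      = [((nomes.length : Int), x)] := by
    simp [PySem.List.enumerate]
  rw [h]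
  by_cases hx : x = n <;> simp [hx]

lemma pvIdx_length (nomes : List String) (n : String) :
    (pvIdx nomes n).length = nomes.count n := by
  unfold pvIdx
  rw [List.length_map, ← List.countP_eq_length_filter]
  have h : (PySem.List.enumerate nomes 0).countP (fun p => p.2 == n)
      = ((PySem.List.enumerate nomes 0).map (fun p => p.2)).countP (fun y => y == n) := by
    rw [List.countP_map]
    rfl
  rw [h, PySem.List.map_snd_enumerate, List.count]

lemma pvIdx_ordinal (nomes : List String) :
    ∀ (j : Nat) (m : String), nomes[j]? = some m →
      (pvIdx nomes m)[(nomes.take j).count m]? = some (j : Int) := by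
  induction nomes using List.reverseRecOn with
  | nil => intro j m h; simp at h
  | append_singleton xs x ih =>
    intro j m h
    have hjlen : j < xs.length + 1 := by
      have := List.getElem?_eq_some_iff.mp h
      obtain ⟨hlt, -⟩ := this
      simpa using hlt
    by_cases hj : j < xs.length
    · have hx : xs[j]? = some m := by
        rw [List.getElem?_append_left hj] at h
        exact h
      have htake : (xs ++ [x]).take j = xs.take j := by
        rw [List.take_append_of_le_length (by omega)]
      have hres := ih j m hx
      have hlt : (xs.take j).count m < (pvIdx xs m).length :=
        (List.getElem?_eq_some_iff.mp hres).1
      rw [pvIdx_append, htake, List.getElem?_append_left hlt]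
      exact hres
    · have hj' : j = xs.length := by omega
      subst hj'
      have hm : x = m := by
        rw [List.getElem?_append_right (le_refl _)] at h
        simpa using h
      subst hm
      have htake : (xs ++ [x]).take xs.length = xs := List.take_left
      rw [pvIdx_append, htake, if_pos rfl]
      rw [List.getElem?_append_right (by rw [pvIdx_length])]
      simp [pvIdx_length]

-- the inner scatter fold, generically (any enumerate start s, any output list)
lemma pvSetFold_len (nome : String) (idxs : List Int) :
    ∀ (s : Int) (out : List String),
      ((PySem.List.enumerate idxs s).foldl
        (fun o p => o.set p.2.toNat (if p.1 = 0 then nome else nome ++ "_" ++ PySem.Int.toStr p.1))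
        out).length = out.length := by
  induction idxs with
  | nil => intro s out; simp [PySem.List.enumerate]
  | cons x xs ih =>
    intro s out
    rw [PySem.List.enumerate_cons, List.foldl_cons, ih]
    simp

lemma pvSetFold_not_mem (nome : String) (idxs : List Int)
    (hpos : ∀ x ∈ idxs, 0 ≤ x) (j : Nat) (hj : (j : Int) ∉ idxs) :
    ∀ (s : Int) (out : List String),
      ((PySem.List.enumerate idxs s).foldl
        (fun o p => o.set p.2.toNat (if p.1 = 0 then nome else nome ++ "_" ++ PySem.Int.toStr p.1))
        out)[j]? = out[j]? := by
  induction idxs with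
  | nil => intro s out; simp [PySem.List.enumerate]
  | cons x xs ih =>
    intro s out
    rw [PySem.List.enumerate_cons, List.foldl_cons]
    have hxj : x.toNat ≠ j := by
      have hx0 : 0 ≤ x := hpos x (by simp)
      have hxne : x ≠ (j : Int) := by intro hc; exact hj (by simp [hc])
      omega
    rw [ih (fun y hy => hpos y (by simp [hy])) (fun hc => hj (by simp [hc]))]
    exact List.getElem?_set_ne hxj

lemma pvSetFold_mem (nome : String) (idxs : List Int)
    (hpos : ∀ x ∈ idxs, 0 ≤ x) (hnd : idxs.Nodup) :
    ∀ (k : Nat) (j : Nat), idxs[k]? = some (j : Int) →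
    ∀ (s : Int) (out : List String), j < out.length →
      ((PySem.List.enumerate idxs s).foldl
        (fun o p => o.set p.2.toNat (if p.1 = 0 then nome else nome ++ "_" ++ PySem.Int.toStr p.1))
        out)[j]? = some (pvVal nome (s + k)) := by
  induction idxs with
  | nil => intro k j hk; simp at hk
  | cons x xs ih =>
    intro k j hk s out hj
    rw [PySem.List.enumerate_cons, List.foldl_cons]
    cases k with
    | zero =>
      have hx : x = (j : Int) := by simpa using hk
      subst hx
      have hjx : ((j : Int)).toNat = j := by omega
      have hnot : ((j : Int)) ∉ xs := (List.nodup_cons.mp hnd).1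
      rw [pvSetFold_not_mem nome xs (fun y hy => hpos y (by simp [hy])) j hnot]
      rw [hjx]
      rw [List.getElem?_set_self (by simpa using hj)]
      simp [pvVal]
    | succ k =>
      have hk' : xs[k]? = some (j : Int) := by simpa using hk
      have hout' : j < (out.set x.toNat (if s = 0 then nome else nome ++ "_" ++ PySem.Int.toStr s)).length := by
        simpa using hj
      have := ih (fun y hy => hpos y (by simp [hy])) (List.nodup_cons.mp hnd).2 k j hk' (s + 1) _ hout'
      rw [this]
      congr 1
      have : s + 1 + (k : Int) = s + ((k : Int) + 1) := by ring
      simp [this]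

-- the outer fold over a list of group names
lemma pvGFold_len (nomes : List String) (names : List String) :
    ∀ (out : List String),
      (names.foldl (fun o n => pvScatterGroup o n (pvIdx nomes n)) out).length = out.length := by
  induction names with
  | nil => intro out; simp
  | cons n ns ih =>
    intro out
    rw [List.foldl_cons, ih]
    unfold pvScatterGroup
    by_cases hn : n = ""
    · simp [hn]
    · rw [if_neg hn, pvSetFold_len]

lemma pvGFold_not_mem (nomes : List String) (names : List String) (j : Nat)
    (h : ∀ n ∈ names, n ≠ "" → (j : Int) ∉ pvIdx nomes n) :
    ∀ (out : List String),
      (names.foldl (fun o n => pvScatterGroup o n (pvIdx nomes n)) out)[j]? = out[j]? := by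
  induction names with
  | nil => intro out; simp
  | cons n ns ih =>
    intro out
    rw [List.foldl_cons, ih (fun n' hn' => h n' (by simp [hn']))]
    unfold pvScatterGroup
    by_cases hn : n = ""
    · simp [hn]
    · rw [if_neg hn]
      exact pvSetFold_not_mem n _ (pvIdx_nonneg nomes n) j (h n (by simp) hn) 0 out

lemma pvGFold_at (nomes : List String) (m : String) (hm : m ≠ "") (j : Nat)
    (hgetj : nomes[j]? = some m) :
    ∀ (names : List String), names.Nodup → m ∈ names →
    ∀ (out : List String), j < out.length →
      (names.foldl (fun o n => pvScatterGroup o n (pvIdx nomes n)) out)[j]?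
        = some (pvVal m (((nomes.take j).count m : Nat) : Int)) := by
  intro names
  induction names with
  | nil => intro _ hmem; simp at hmem
  | cons n ns ih =>
    intro hnd hmem out hj
    rw [List.foldl_cons]
    by_cases hnm : n = m
    · subst hnm
      have hnot : n ∉ ns := (List.nodup_cons.mp hnd).1
      have huntouched : ∀ n' ∈ ns, n' ≠ "" → (j : Int) ∉ pvIdx nomes n' := by
        intro n' hn' _ hc
        obtain ⟨k, hk, hkn⟩ := pvIdx_mem nomes n' _ hc
        have hkj : k = j := by omega
        subst hkj
        rw [hgetj] at hkn
        have : n' = n := by injection hkn with h'; exact h'.symm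
        exact hnot (this ▸ hn')
      rw [pvGFold_not_mem nomes ns j huntouched]
      unfold pvScatterGroup
      rw [if_neg hm]
      have hord := pvIdx_ordinal nomes j n hgetj
      have := pvSetFold_mem n (pvIdx nomes n) (pvIdx_nonneg nomes n) (pvIdx_nodup nomes n)
        ((nomes.take j).count n) j hord 0 out hj
      rw [this]
      congr 1
      simp
    · have hmem' : m ∈ ns := by
        rcases List.mem_cons.mp hmem with h | h
        · exact absurd h.symm hnm
        · exact h
      have hj' : j < (pvScatterGroup out n (pvIdx nomes n)).length := by
        unfold pvScatterGroup
        by_cases hn : n = ""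
        · simpa [hn] using hj
        · rw [if_neg hn, pvSetFold_len]; exact hj
      exact ih (List.nodup_cons.mp hnd).2 hmem' _ hj'

-- assembling B: grupos.getD n [] = pvIdx, keys = set(nomes), then the pointwise argument
lemma pvGroups_getD (nomes : List String) (n : String) :
    ((PySem.List.enumerate nomes).foldl
      (fun d p => d.modify p.2 [] (fun l => l ++ [p.1])) (PySem.Dict.empty)).getD n []
      = pvIdx nomes n := by
  have hswap : (PySem.List.enumerate nomes).foldl
      (fun d p => d.modify p.2 [] (fun l => l ++ [p.1])) (PySem.Dict.empty)
      = ((PySem.List.enumerate nomes).map Prod.swap).foldl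
        (fun d p => d.modify p.1 [] (fun l => l ++ [p.2])) (PySem.Dict.empty) := by
    rw [List.foldl_map]
    rfl
  rw [hswap, PySem.Dict.getD_foldl_modify_append, List.filter_map, List.map_map]
  unfold pvIdx
  simp [Function.comp_def, PySem.Dict.getD_empty]

lemma pvGroups_keys (nomes : List String) :
    ((PySem.List.enumerate nomes).foldl
      (fun d p => d.modify p.2 [] (fun l => l ++ [p.1])) (PySem.Dict.empty)).keys
      = PySem.Set.ofList nomes := by
  have h := PySem.Dict.keys_foldl_modify_key (PySem.List.enumerate nomes)
    (fun p => p.2) [] (fun _ p => fun l => l ++ [p.1]) (PySem.Dict.empty)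
  rw [h, PySem.List.map_snd_enumerate]
  rfl

lemma pvGroups_nodup_keys (nomes : List String) :
    ((PySem.List.enumerate nomes).foldl
      (fun d p => d.modify p.2 [] (fun l => l ++ [p.1])) (PySem.Dict.empty)).keys.Nodup := by
  rw [pvGroups_keys]
  exact PySem.Set.nodup_ofList nomes

lemma pvBeq (colunas : List String) :
    normalizar_cabecalho_py_alt colunas
      = (List.range (colunas.map PySem.Str.strip).length).map
          (pvEntry (colunas.map PySem.Str.strip)) := by
  have halt : normalizar_cabecalho_py_alt colunas
      = ((PySem.List.enumerate (colunas.map PySem.Str.strip)).foldl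
          (fun d p => d.modify p.2 [] (fun l => l ++ [p.1])) (PySem.Dict.empty)).items.foldl
          (fun o p => pvScatterGroup o p.1 p.2)
          (List.replicate (colunas.map PySem.Str.strip).length "") := rfl
  rw [halt]
  set nomes := colunas.map PySem.Str.strip with hnm
  have hitems : ((PySem.List.enumerate nomes).foldl
      (fun d p => d.modify p.2 [] (fun l => l ++ [p.1])) (PySem.Dict.empty)).items
      = (PySem.Set.ofList nomes).map (fun n => (n, pvIdx nomes n)) := by
    rw [PySem.Dict.items_eq_map_keys _ (pvGroups_nodup_keys nomes) []]
    rw [pvGroups_keys]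
    apply List.map_congr_left
    intro n _
    rw [pvGroups_getD]
  have hfold : ((PySem.List.enumerate nomes).foldl
      (fun d p => d.modify p.2 [] (fun l => l ++ [p.1])) (PySem.Dict.empty)).items.foldl
      (fun o p => pvScatterGroup o p.1 p.2) (List.replicate nomes.length "")
      = (PySem.Set.ofList nomes).foldl
          (fun o n => pvScatterGroup o n (pvIdx nomes n)) (List.replicate nomes.length "") := by
    rw [hitems, List.foldl_map]
  rw [hfold]
  apply List.ext_getElem?
  intro j
  by_cases hjN : j < nomes.length
  · have hget : nomes[j]? = some (nomes[j]) := List.getElem?_eq_getElem hjN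
    have hrhs : ((List.range nomes.length).map (pvEntry nomes))[j]? = some (pvEntry nomes j) := by
      rw [List.getElem?_map]
      simp [List.getElem?_range hjN]
    by_cases hmm : nomes[j] = ""
    · have huntouched : ∀ n ∈ PySem.Set.ofList nomes, n ≠ "" → (j : Int) ∉ pvIdx nomes n := by
        intro n _ hn hc
        obtain ⟨k, hk, hkn⟩ := pvIdx_mem nomes n _ hc
        have hkj : k = j := by omega
        rw [hkj, hget] at hkn
        have hnj : nomes[j] = n := Option.some.inj hkn
        exact hn (hnj ▸ hmm)
      rw [pvGFold_not_mem nomes _ j huntouched]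
      rw [hrhs]
      have hent : pvEntry nomes j = "" := by
        unfold pvEntry
        simp [List.getD, hget, hmm]
      rw [hent]
      simp [hjN]
    · have hmemset : nomes[j] ∈ PySem.Set.ofList nomes := by
        rw [PySem.Set.mem_ofList]
        exact List.getElem_mem hjN
      have hlen : j < (List.replicate nomes.length "").length := by simp [hjN]
      rw [pvGFold_at nomes (nomes[j]) hmm j hget (PySem.Set.ofList nomes)
        (PySem.Set.nodup_ofList nomes) hmemset (List.replicate nomes.length "") hlen]
      rw [hrhs]
      congr 1
      unfold pvEntry pvVal
      have hgd : nomes.getD j "" = nomes[j] := by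
        rw [List.getD_eq_getElem?_getD, hget]; rfl
      simp only [hgd, if_neg hmm]
      by_cases h0 : (nomes.take j).count nomes[j] = 0
      · simp [h0]
      · have hcast : ¬ (((nomes.take j).count nomes[j] : Nat) : Int) = 0 := by
          exact_mod_cast h0
        simp [h0]
  · have h1 : ((PySem.Set.ofList nomes).foldl
        (fun o n => pvScatterGroup o n (pvIdx nomes n)) (List.replicate nomes.length ""))[j]?
        = none := by
      apply List.getElem?_eq_none
      rw [pvGFold_len]
      simpa using (by omega : nomes.length ≤ j)
    rw [h1]
    symm
    apply List.getElem?_eq_none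
    simpa using (by omega : nomes.length ≤ j)

-- ===== VERDICT (by name: the statement is the Claim_ definition above) =====
theorem normalizar_cabecalho_py_spec : Claim_equal_normalizar_cabecalho_py := by
  intro colunas _
  unfold Spec_normalizar_cabecalho_py
  rw [pvAeq, pvBeq]
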